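-- pv_equiv track=rewrite | github.com/SunnyYie/agent-flow-next | agent_flow/core/runtime.py | _parse_backend_list
-- ===== SOURCE A (Python) =====
-- def _parse_backend_list(raw_value: str) -> set[str]:
--     """Parse a backend specification string (e.g. 'a+b,c') into a normalized set."""
--     separators = ["+", ",", " "]
--     values = [raw_value]
--     for separator in separators:
--         expanded: list[str] = []
--         for value in values:
--             expanded.extend(value.split(separator))
--         values = expanded
--     normalized = {value.strip() for value in values if value.strip()}
--     return normalized or {"command"}
-- ===== SOURCE B (Python) =====
-- def _parse_backend_list(raw_value: str) -> set[str]: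
--     """Parse a backend specification string (e.g. 'a+b,c') into a normalized set."""
--     normalized: set[str] = set()
--     token: list[str] = []
--     for ch in raw_value:
--         if ch in "+, ":
--             stripped = "".join(token).strip()
--             if stripped:
--                 normalized.add(stripped)
--             token = []
--         else:
--             token.append(ch)
--     stripped = "".join(token).strip()
--     if stripped:
--         normalized.add(stripped)
--     return normalized or {"command"}
-- ===== Notes on version B (the rewrite author's own statement) =====
-- stated objective: simpler
-- what changed: Replaces the three sequential split passes over a growing list of fragments with a single left-to-right tokenization pass that flushes the current token at every separator character.
import Mathlib
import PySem

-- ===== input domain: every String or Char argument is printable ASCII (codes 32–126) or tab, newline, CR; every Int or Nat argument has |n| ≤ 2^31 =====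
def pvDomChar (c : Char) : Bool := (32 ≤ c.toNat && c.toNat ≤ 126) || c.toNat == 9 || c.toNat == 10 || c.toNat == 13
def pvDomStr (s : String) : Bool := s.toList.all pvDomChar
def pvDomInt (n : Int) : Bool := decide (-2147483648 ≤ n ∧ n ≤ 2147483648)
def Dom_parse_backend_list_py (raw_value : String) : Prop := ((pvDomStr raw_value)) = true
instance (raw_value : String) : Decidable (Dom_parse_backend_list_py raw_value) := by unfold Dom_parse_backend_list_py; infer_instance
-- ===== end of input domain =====

-- B replaces A's three sequential split passes with a single left-to-right tokenization pass (simpler, one traversal).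

-- ===== PORT A =====
-- value.split(separator): the separators A uses are the nonempty literals "+", ",", " ", so split? is always `some` here
def pySplit (value sep : String) : List String := (PySem.Str.split? value sep).getD []

def parse_backend_list_py (raw_value : String) : List String :=
  let separators : List String := ["+", ",", " "]
  let values : List String := [raw_value]
  let values := separators.foldl
    (fun values separator =>
      values.foldl (fun expanded value => expanded ++ pySplit value separator) []) values
  let normalized : PySem.Set String := values.foldl
    (fun s value =>
      if PySem.Str.strip value ≠ "" then PySem.Set.add s (PySem.Str.strip value) else s)
    PySem.Set.empty
  if normalized = [] then ["command"] else normalized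

-- ===== PORT B =====
-- Source B keeps the current token as a list of chars; "".join(token) is String.ofList
def parse_backend_list_py_alt (raw_value : String) : List String :=
  let step := fun (st : PySem.Set String × List Char) (ch : Char) =>
    if "+, ".toList.contains ch then
      (if PySem.Str.strip (String.ofList st.2) ≠ "" then
        (PySem.Set.add st.1 (PySem.Str.strip (String.ofList st.2)), ([] : List Char))
      else (st.1, ([] : List Char)))
    else (st.1, st.2 ++ [ch])
  let fin := raw_value.toList.foldl step (PySem.Set.empty, ([] : List Char))
  let normalized :=
    if PySem.Str.strip (String.ofList fin.2) ≠ "" then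
      PySem.Set.add fin.1 (PySem.Str.strip (String.ofList fin.2))
    else fin.1
  if normalized = [] then ["command"] else normalized

-- ===== PRECONDITION & SPEC =====
def Spec_parse_backend_list_py (raw_value : String) (out : List String) : Prop := out = parse_backend_list_py_alt raw_value
instance (raw_value : String) (out : List String) : Decidable (Spec_parse_backend_list_py raw_value out) := by unfold Spec_parse_backend_list_py; infer_instance

-- ===== CLAIM (what is proved, stated in full; the proofs are below) =====
def Claim_equal_parse_backend_list_py : Prop := ∀ (raw_value : String), Dom_parse_backend_list_py raw_value → Spec_parse_backend_list_py raw_value (parse_backend_list_py raw_value)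

-- ===== LEMMAS AND PROOFS =====

-- a single-pass splitter on a class of separator characters, and its basic facts
def consHead (c : Char) : List (List Char) → List (List Char)
  | [] => [[c]]
  | t :: ts => (c :: t) :: ts

def splitAny (p : Char → Bool) : List Char → List (List Char)
  | [] => [[]]
  | c :: cs => if p c then [] :: splitAny p cs else consHead c (splitAny p cs)

def pSep (c : Char) : Bool := (c == '+' || c == ',') || c == ' '

def addStr (s : PySem.Set String) (t : List Char) : PySem.Set String :=
  if PySem.Str.strip (String.ofList t) ≠ "" then
    PySem.Set.add s (PySem.Str.strip (String.ofList t))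
  else s

theorem splitAny_ne_nil (p : Char → Bool) (l : List Char) : splitAny p l ≠ [] := by
  cases l with
  | nil => simp [splitAny]
  | cons c cs =>
    simp only [splitAny]
    split
    · simp
    · cases splitAny p cs <;> simp [consHead]

theorem go_single (a : Char) : ∀ (fuel : Nat) (l cur : List Char) (acc : List (List Char)),
    l.length ≤ fuel →
    PySem.Chars.splitOn.go [a] fuel l cur acc =
      acc.reverse ++ (match splitAny (· == a) l with
        | [] => [cur.reverse]
        | t :: ts => (cur.reverse ++ t) :: ts) := by
  intro fuel
  induction fuel with
  | zero =>
    intro l cur acc h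
    have : l = [] := by cases l <;> simp_all
    subst this
    simp [PySem.Chars.splitOn.go, splitAny]
  | succ f ih =>
    intro l cur acc h
    cases l with
    | nil => simp [PySem.Chars.splitOn.go, splitAny]
    | cons c rest =>
      rw [PySem.Chars.splitOn.go]
      simp only [List.isPrefixOf, Bool.and_true]
      by_cases hc : a = c
      · have hb : (a == c) = true := by simp [hc]
        have hb2 : (c == a) = true := by simp [hc]
        simp only [hb, if_true, List.length_cons, List.length_nil, Nat.zero_add,
          List.drop_succ_cons, List.drop_zero]
        rw [ih rest [] (cur.reverse :: acc) (by simpa using Nat.le_of_succ_le_succ h)]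
        cases hs : splitAny (· == a) rest with
        | nil => exact absurd hs (splitAny_ne_nil _ _)
        | cons t ts => simp [splitAny, hb2, hs]
      · have hb : (a == c) = false := by simp [hc]
        have hb2 : (c == a) = false := by simp [Ne.symm hc]
        simp only [hb, if_false, Bool.false_eq_true]
        rw [ih rest (c :: cur) acc (by simpa using Nat.le_of_succ_le_succ h)]
        cases hs : splitAny (· == a) rest with
        | nil => exact absurd hs (splitAny_ne_nil _ _)
        | cons t ts => simp [splitAny, hb2, hs, consHead]

theorem splitOn_single (a : Char) (l : List Char) :
    PySem.Chars.splitOn l [a] = splitAny (· == a) l := by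
  have := go_single a (l.length + 1) l [] [] (by omega)
  simp only [PySem.Chars.splitOn, this, List.reverse_nil, List.nil_append]
  cases h : splitAny (· == a) l with
  | nil => exact absurd h (splitAny_ne_nil _ _)
  | cons t ts => simp

theorem pySplit_eq (v sep : String) (a : Char) (hsep : sep.toList = [a]) :
    pySplit v sep = (splitAny (· == a) v.toList).map String.ofList := by
  simp [pySplit, PySem.Str.split?, PySem.Chars.split?, hsep, splitOn_single]

-- sequential splitting composes: splitting the pieces again on p refines into one predicate
theorem flatMap_splitAny (p q : Char → Bool) (l : List Char) :
    (splitAny q l).flatMap (splitAny p) = splitAny (fun c => q c || p c) l := by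
  induction l with
  | nil => simp [splitAny]
  | cons c cs ih =>
    by_cases hq : q c
    · simp only [splitAny, hq, if_true, Bool.true_or, List.flatMap_cons, ih]
      simp only [List.nil_append, List.cons_append]
    · simp only [splitAny, hq, Bool.false_or]
      by_cases hp : p c
      · cases hs : splitAny q cs with
        | nil => exact absurd hs (splitAny_ne_nil _ _)
        | cons t ts =>
          rw [hs] at ih
          simp only [consHead, hp, if_true, List.flatMap_cons, ← ih]
          simp [splitAny, hp]
      · cases hs : splitAny q cs with
        | nil => exact absurd hs (splitAny_ne_nil _ _)
        | cons t ts =>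
          rw [hs] at ih
          simp only [consHead, hp, List.flatMap_cons, ← ih]
          cases ht : splitAny p t with
          | nil => exact absurd ht (splitAny_ne_nil _ _)
          | cons u us => simp [splitAny, hp, ht, consHead]

theorem contains_eq_pSep (c : Char) : ("+, ".toList.contains c) = pSep c := by
  show (['+', ',', ' '].contains c) = pSep c
  simp only [List.contains_cons, List.contains_nil, Bool.or_false, pSep, Bool.or_assoc]

def prependTok (tok : List Char) : List (List Char) → List (List Char)
  | [] => [tok]
  | t :: ts => (tok ++ t) :: ts

-- B's loop invariant: folding the step then flushing = flushing every token of splitAny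
theorem bloop (l : List Char) : ∀ (s : PySem.Set String) (tok : List Char),
    (let fin := l.foldl (fun (st : PySem.Set String × List Char) (ch : Char) =>
        if "+, ".toList.contains ch then
          (if PySem.Str.strip (String.ofList st.2) ≠ "" then
            (PySem.Set.add st.1 (PySem.Str.strip (String.ofList st.2)), ([] : List Char))
          else (st.1, ([] : List Char)))
        else (st.1, st.2 ++ [ch])) (s, tok);
      addStr fin.1 fin.2)
      = (prependTok tok (splitAny pSep l)).foldl addStr s := by
  induction l with
  | nil => intro s tok; simp [splitAny, prependTok, addStr]
  | cons c cs ih =>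
    intro s tok
    simp only [List.foldl_cons]
    by_cases hc : pSep c
    · have hc' : ("+, ".toList.contains c) = true := by rw [contains_eq_pSep]; exact hc
      simp only [hc', if_true, splitAny, hc]
      rw [show (if PySem.Str.strip (String.ofList tok) ≠ "" then
            (PySem.Set.add s (PySem.Str.strip (String.ofList tok)), ([] : List Char))
          else (s, ([] : List Char))) = (addStr s tok, ([] : List Char)) by
        unfold addStr; split <;> rfl]
      rw [ih (addStr s tok) []]
      cases hs : splitAny pSep cs with
      | nil => exact absurd hs (splitAny_ne_nil _ _)
      | cons t ts => simp [prependTok]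
    · have hc' : ("+, ".toList.contains c) = false := by rw [contains_eq_pSep]; exact (Bool.not_eq_true _).mp hc
      simp only [hc', if_false, splitAny, hc, Bool.false_eq_true]
      rw [ih s (tok ++ [c])]
      cases hs : splitAny pSep cs with
      | nil => exact absurd hs (splitAny_ne_nil _ _)
      | cons t ts => simp [prependTok, consHead]

-- A's three split passes produce the tokens of the single-pass splitter, as strings
theorem a_values (raw_value : String) :
    (["+", ",", " "].foldl
      (fun values separator =>
        values.foldl (fun expanded value => expanded ++ pySplit value separator) [])
      [raw_value])
      = (splitAny pSep raw_value.toList).map String.ofList := by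
  have hfm : ∀ (vs : List String) (sep : String),
      vs.foldl (fun expanded value => expanded ++ pySplit value sep) [] =
        vs.flatMap (fun v => pySplit v sep) := by
    intro vs sep
    simpa using PySem.List.foldl_append_eq_flatMap (fun v => pySplit v sep) (l := vs) (acc := [])
  simp only [List.foldl_cons, List.foldl_nil, hfm]
  rw [show ([raw_value].flatMap fun v => pySplit v "+") = pySplit raw_value "+" by simp]
  rw [pySplit_eq raw_value "+" '+' rfl]
  rw [List.flatMap_map]
  have h2 : (fun v : List Char => pySplit (String.ofList v) ",") =
      fun v : List Char => (splitAny (· == ',') v).map String.ofList := by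
    funext v
    rw [pySplit_eq (String.ofList v) "," ',' rfl]
    simp
  rw [h2, ← List.map_flatMap, flatMap_splitAny]
  rw [List.flatMap_map]
  have h3 : (fun v : List Char => pySplit (String.ofList v) " ") =
      fun v : List Char => (splitAny (· == ' ') v).map String.ofList := by
    funext v
    rw [pySplit_eq (String.ofList v) " " ' ' rfl]
    simp
  rw [h3, ← List.map_flatMap, flatMap_splitAny]
  rfl

-- ===== VERDICT (by name: the statement is the Claim_ definition above) =====
theorem parse_backend_list_py_spec : Claim_equal_parse_backend_list_py := by
  intro raw_value _
  show parse_backend_list_py raw_value = parse_backend_list_py_alt raw_value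
  have hcore : ((splitAny pSep raw_value.toList).map String.ofList).foldl
      (fun s value =>
        if PySem.Str.strip value ≠ "" then PySem.Set.add s (PySem.Str.strip value) else s)
      PySem.Set.empty
      = (prependTok [] (splitAny pSep raw_value.toList)).foldl addStr PySem.Set.empty := by
    rw [List.foldl_map]
    rw [show (fun (s : PySem.Set String) (t : List Char) =>
        if PySem.Str.strip (String.ofList t) ≠ "" then
          PySem.Set.add s (PySem.Str.strip (String.ofList t)) else s) = addStr from rfl]
    cases hs : splitAny pSep raw_value.toList with
    | nil => exact absurd hs (splitAny_ne_nil _ _)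
    | cons t ts => simp [prependTok]
  have hA : parse_backend_list_py raw_value =
      (if (prependTok [] (splitAny pSep raw_value.toList)).foldl addStr PySem.Set.empty = []
       then ["command"]
       else (prependTok [] (splitAny pSep raw_value.toList)).foldl addStr PySem.Set.empty) := by
    simp only [parse_backend_list_py]
    rw [a_values raw_value, hcore]
  have hB : parse_backend_list_py_alt raw_value =
      (if (prependTok [] (splitAny pSep raw_value.toList)).foldl addStr PySem.Set.empty = []
       then ["command"]
       else (prependTok [] (splitAny pSep raw_value.toList)).foldl addStr PySem.Set.empty) := by
    have h := bloop raw_value.toList PySem.Set.empty []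
    simp only [parse_backend_list_py_alt]
    rw [← h]
    rfl
  rw [hA, hB]
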